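-- pv_equiv track=rewrite | github.com/sajor2000/rush_policy_rag | scripts/run_enhanced_evaluation.py | _has_semantic_match
-- ===== SOURCE A (Python) =====
-- NEGATION_SYNONYMS = {
--     "not allowed": ["not permitted", "prohibited", "forbidden", "cannot", "may not", "must not", "no authorization", "no policy authorization"],
--     "not permitted": ["not allowed", "prohibited", "forbidden", "cannot", "may not", "no authorization", "no policy authorization"],
--     "cannot": ["can not", "can't", "unable to", "not able to", "not authorized", "may not", "no authorization", "no policy authorization"],
--     "does not": ["do not", "doesn't", "don't", "will not", "won't"],
--     "does not respond": ["do not respond", "doesn't respond", "does not go", "will not respond"],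
--     "does NOT": ["does not", "do not", "will not", "doesn't"],
--     "are not": ["is not", "aren't", "isn't", "not authorized", "cannot", "no authorization", "no policy authorization"],
--     "not authorized": ["not permitted", "cannot", "may not", "are not allowed", "not authorized to", "no authorization", "no policy authorization"],
--     "not": ["no authorization", "no policy authorization", "no policy", "cannot", "may not", "there is no"],
--     "required": ["must", "mandatory", "necessary", "need to", "shall", "requirement"],
--     "limited": ["restricted", "only", "specific", "designated", "sparingly"],
--     "emergent": ["emergency", "urgent", "critical", "immediate"],
--     "emergencies": ["emergency situations", "emergency", "emergent", "urgent situations", "except in emergency"],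
--     "does not state": ["does not say", "policy does not", "not in the policy", "not true", "no,"],
--     "fasting": ["NPO", "nothing by mouth", "no food", "nil per os"],
--     "renal": ["kidney", "dialysis", "ESRD", "nephrology"],
--     "indwelling": ["foley", "catheter", "urinary", "bladder"],
--     "resonance": ["MR", "MRI", "magnetic"],
--     "imaging": ["MRI", "scan", "radiology"],
--     "exception": ["except", "emergency", "unless", "however"],
-- }
--
-- ENTITY_EXPANSIONS = {
--     "Rush University Medical Center": ["RUMC", "Rush", "medical center"],
--     "Rush Copley": ["RCMC", "Rush Copley Medical Center", "Copley"],
--     "Rush Medical Group": ["RMG", "medical group"],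
--     "Oak Park": ["ROPH", "Rush Oak Park", "Rush Oak Park Hospital"],
-- }
--
-- def _has_semantic_match(response: str, expected: str) -> bool:
--     """Check if response contains a semantic equivalent of expected."""
--     response_lower = response.lower()
--     expected_lower = expected.lower()
--
--     # Direct match
--     if expected_lower in response_lower:
--         return True
--
--     # Check synonyms
--     for base_term, synonyms in NEGATION_SYNONYMS.items():
--         if expected_lower == base_term or expected_lower in synonyms:
--             # Check if ANY synonym is in the response
--             all_terms = [base_term] + synonyms
--             if any(term.lower() in response_lower for term in all_terms):
--                 return True
--
--     # Check entity expansions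
--     for full_name, abbreviations in ENTITY_EXPANSIONS.items():
--         if expected_lower in [full_name.lower()] + [a.lower() for a in abbreviations]:
--             all_forms = [full_name.lower()] + [a.lower() for a in abbreviations]
--             if any(form in response_lower for form in all_forms):
--                 return True
--
--     return False
-- ===== SOURCE B (Python) =====
-- # Reverse-lookup index precomputed from NEGATION_SYNONYMS / ENTITY_EXPANSIONS:
-- # each trigger term maps to the union of all lowercased equivalent forms of
-- # every entry (negation or entity) it occurs in.  One keyed lookup per call
-- # replaces the per-call scan over both dictionaries.
-- _EQUIVALENTS = {
--     'not allowed': ['not allowed', 'not permitted', 'prohibited', 'forbidden', 'cannot', 'may not', 'must not', 'no authorization', 'no policy authorization'],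
--     'not permitted': ['not allowed', 'not permitted', 'prohibited', 'forbidden', 'cannot', 'may not', 'must not', 'no authorization', 'no policy authorization', 'not authorized', 'are not allowed', 'not authorized to'],
--     'prohibited': ['not allowed', 'not permitted', 'prohibited', 'forbidden', 'cannot', 'may not', 'must not', 'no authorization', 'no policy authorization'],
--     'forbidden': ['not allowed', 'not permitted', 'prohibited', 'forbidden', 'cannot', 'may not', 'must not', 'no authorization', 'no policy authorization'],
--     'cannot': ['not allowed', 'not permitted', 'prohibited', 'forbidden', 'cannot', 'may not', 'must not', 'no authorization', 'no policy authorization', 'can not', "can't", 'unable to', 'not able to', 'not authorized', 'are not', 'is not', "aren't", "isn't", 'are not allowed', 'not authorized to', 'not', 'no policy', 'there is no'],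
--     'may not': ['not allowed', 'not permitted', 'prohibited', 'forbidden', 'cannot', 'may not', 'must not', 'no authorization', 'no policy authorization', 'can not', "can't", 'unable to', 'not able to', 'not authorized', 'are not allowed', 'not authorized to', 'not', 'no policy', 'there is no'],
--     'must not': ['not allowed', 'not permitted', 'prohibited', 'forbidden', 'cannot', 'may not', 'must not', 'no authorization', 'no policy authorization'],
--     'no authorization': ['not allowed', 'not permitted', 'prohibited', 'forbidden', 'cannot', 'may not', 'must not', 'no authorization', 'no policy authorization', 'can not', "can't", 'unable to', 'not able to', 'not authorized', 'are not', 'is not', "aren't", "isn't", 'are not allowed', 'not authorized to', 'not', 'no policy', 'there is no'],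
--     'no policy authorization': ['not allowed', 'not permitted', 'prohibited', 'forbidden', 'cannot', 'may not', 'must not', 'no authorization', 'no policy authorization', 'can not', "can't", 'unable to', 'not able to', 'not authorized', 'are not', 'is not', "aren't", "isn't", 'are not allowed', 'not authorized to', 'not', 'no policy', 'there is no'],
--     'can not': ['cannot', 'can not', "can't", 'unable to', 'not able to', 'not authorized', 'may not', 'no authorization', 'no policy authorization'],
--     "can't": ['cannot', 'can not', "can't", 'unable to', 'not able to', 'not authorized', 'may not', 'no authorization', 'no policy authorization'],
--     'unable to': ['cannot', 'can not', "can't", 'unable to', 'not able to', 'not authorized', 'may not', 'no authorization', 'no policy authorization'],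
--     'not able to': ['cannot', 'can not', "can't", 'unable to', 'not able to', 'not authorized', 'may not', 'no authorization', 'no policy authorization'],
--     'not authorized': ['cannot', 'can not', "can't", 'unable to', 'not able to', 'not authorized', 'may not', 'no authorization', 'no policy authorization', 'are not', 'is not', "aren't", "isn't", 'not permitted', 'are not allowed', 'not authorized to'],
--     'does not': ['does not', 'do not', "doesn't", "don't", 'will not', "won't"],
--     'do not': ['does not', 'do not', "doesn't", "don't", 'will not', "won't"],
--     "doesn't": ['does not', 'do not', "doesn't", "don't", 'will not', "won't"],
--     "don't": ['does not', 'do not', "doesn't", "don't", 'will not', "won't"],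
--     'will not': ['does not', 'do not', "doesn't", "don't", 'will not', "won't"],
--     "won't": ['does not', 'do not', "doesn't", "don't", 'will not', "won't"],
--     'does not respond': ['does not respond', 'do not respond', "doesn't respond", 'does not go', 'will not respond'],
--     'do not respond': ['does not respond', 'do not respond', "doesn't respond", 'does not go', 'will not respond'],
--     "doesn't respond": ['does not respond', 'do not respond', "doesn't respond", 'does not go', 'will not respond'],
--     'does not go': ['does not respond', 'do not respond', "doesn't respond", 'does not go', 'will not respond'],
--     'will not respond': ['does not respond', 'do not respond', "doesn't respond", 'does not go', 'will not respond'],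
--     'does NOT': ['does not', 'do not', 'will not', "doesn't"],
--     'are not': ['are not', 'is not', "aren't", "isn't", 'not authorized', 'cannot', 'no authorization', 'no policy authorization'],
--     'is not': ['are not', 'is not', "aren't", "isn't", 'not authorized', 'cannot', 'no authorization', 'no policy authorization'],
--     "aren't": ['are not', 'is not', "aren't", "isn't", 'not authorized', 'cannot', 'no authorization', 'no policy authorization'],
--     "isn't": ['are not', 'is not', "aren't", "isn't", 'not authorized', 'cannot', 'no authorization', 'no policy authorization'],
--     'are not allowed': ['not authorized', 'not permitted', 'cannot', 'may not', 'are not allowed', 'not authorized to', 'no authorization', 'no policy authorization'],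
--     'not authorized to': ['not authorized', 'not permitted', 'cannot', 'may not', 'are not allowed', 'not authorized to', 'no authorization', 'no policy authorization'],
--     'not': ['not', 'no authorization', 'no policy authorization', 'no policy', 'cannot', 'may not', 'there is no'],
--     'no policy': ['not', 'no authorization', 'no policy authorization', 'no policy', 'cannot', 'may not', 'there is no'],
--     'there is no': ['not', 'no authorization', 'no policy authorization', 'no policy', 'cannot', 'may not', 'there is no'],
--     'required': ['required', 'must', 'mandatory', 'necessary', 'need to', 'shall', 'requirement'],
--     'must': ['required', 'must', 'mandatory', 'necessary', 'need to', 'shall', 'requirement'],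
--     'mandatory': ['required', 'must', 'mandatory', 'necessary', 'need to', 'shall', 'requirement'],
--     'necessary': ['required', 'must', 'mandatory', 'necessary', 'need to', 'shall', 'requirement'],
--     'need to': ['required', 'must', 'mandatory', 'necessary', 'need to', 'shall', 'requirement'],
--     'shall': ['required', 'must', 'mandatory', 'necessary', 'need to', 'shall', 'requirement'],
--     'requirement': ['required', 'must', 'mandatory', 'necessary', 'need to', 'shall', 'requirement'],
--     'limited': ['limited', 'restricted', 'only', 'specific', 'designated', 'sparingly'],
--     'restricted': ['limited', 'restricted', 'only', 'specific', 'designated', 'sparingly'],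
--     'only': ['limited', 'restricted', 'only', 'specific', 'designated', 'sparingly'],
--     'specific': ['limited', 'restricted', 'only', 'specific', 'designated', 'sparingly'],
--     'designated': ['limited', 'restricted', 'only', 'specific', 'designated', 'sparingly'],
--     'sparingly': ['limited', 'restricted', 'only', 'specific', 'designated', 'sparingly'],
--     'emergent': ['emergent', 'emergency', 'urgent', 'critical', 'immediate', 'emergencies', 'emergency situations', 'urgent situations', 'except in emergency'],
--     'emergency': ['emergent', 'emergency', 'urgent', 'critical', 'immediate', 'emergencies', 'emergency situations', 'urgent situations', 'except in emergency', 'exception', 'except', 'unless', 'however'],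
--     'urgent': ['emergent', 'emergency', 'urgent', 'critical', 'immediate'],
--     'critical': ['emergent', 'emergency', 'urgent', 'critical', 'immediate'],
--     'immediate': ['emergent', 'emergency', 'urgent', 'critical', 'immediate'],
--     'emergencies': ['emergencies', 'emergency situations', 'emergency', 'emergent', 'urgent situations', 'except in emergency'],
--     'emergency situations': ['emergencies', 'emergency situations', 'emergency', 'emergent', 'urgent situations', 'except in emergency'],
--     'urgent situations': ['emergencies', 'emergency situations', 'emergency', 'emergent', 'urgent situations', 'except in emergency'],
--     'except in emergency': ['emergencies', 'emergency situations', 'emergency', 'emergent', 'urgent situations', 'except in emergency'],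
--     'does not state': ['does not state', 'does not say', 'policy does not', 'not in the policy', 'not true', 'no,'],
--     'does not say': ['does not state', 'does not say', 'policy does not', 'not in the policy', 'not true', 'no,'],
--     'policy does not': ['does not state', 'does not say', 'policy does not', 'not in the policy', 'not true', 'no,'],
--     'not in the policy': ['does not state', 'does not say', 'policy does not', 'not in the policy', 'not true', 'no,'],
--     'not true': ['does not state', 'does not say', 'policy does not', 'not in the policy', 'not true', 'no,'],
--     'no,': ['does not state', 'does not say', 'policy does not', 'not in the policy', 'not true', 'no,'],
--     'fasting': ['fasting', 'npo', 'nothing by mouth', 'no food', 'nil per os'],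
--     'NPO': ['fasting', 'npo', 'nothing by mouth', 'no food', 'nil per os'],
--     'nothing by mouth': ['fasting', 'npo', 'nothing by mouth', 'no food', 'nil per os'],
--     'no food': ['fasting', 'npo', 'nothing by mouth', 'no food', 'nil per os'],
--     'nil per os': ['fasting', 'npo', 'nothing by mouth', 'no food', 'nil per os'],
--     'renal': ['renal', 'kidney', 'dialysis', 'esrd', 'nephrology'],
--     'kidney': ['renal', 'kidney', 'dialysis', 'esrd', 'nephrology'],
--     'dialysis': ['renal', 'kidney', 'dialysis', 'esrd', 'nephrology'],
--     'ESRD': ['renal', 'kidney', 'dialysis', 'esrd', 'nephrology'],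
--     'nephrology': ['renal', 'kidney', 'dialysis', 'esrd', 'nephrology'],
--     'indwelling': ['indwelling', 'foley', 'catheter', 'urinary', 'bladder'],
--     'foley': ['indwelling', 'foley', 'catheter', 'urinary', 'bladder'],
--     'catheter': ['indwelling', 'foley', 'catheter', 'urinary', 'bladder'],
--     'urinary': ['indwelling', 'foley', 'catheter', 'urinary', 'bladder'],
--     'bladder': ['indwelling', 'foley', 'catheter', 'urinary', 'bladder'],
--     'resonance': ['resonance', 'mr', 'mri', 'magnetic'],
--     'MR': ['resonance', 'mr', 'mri', 'magnetic'],
--     'MRI': ['resonance', 'mr', 'mri', 'magnetic', 'imaging', 'scan', 'radiology'],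
--     'magnetic': ['resonance', 'mr', 'mri', 'magnetic'],
--     'imaging': ['imaging', 'mri', 'scan', 'radiology'],
--     'scan': ['imaging', 'mri', 'scan', 'radiology'],
--     'radiology': ['imaging', 'mri', 'scan', 'radiology'],
--     'exception': ['exception', 'except', 'emergency', 'unless', 'however'],
--     'except': ['exception', 'except', 'emergency', 'unless', 'however'],
--     'unless': ['exception', 'except', 'emergency', 'unless', 'however'],
--     'however': ['exception', 'except', 'emergency', 'unless', 'however'],
--     'rush university medical center': ['rush university medical center', 'rumc', 'rush', 'medical center'],
--     'rumc': ['rush university medical center', 'rumc', 'rush', 'medical center'],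
--     'rush': ['rush university medical center', 'rumc', 'rush', 'medical center'],
--     'medical center': ['rush university medical center', 'rumc', 'rush', 'medical center'],
--     'rush copley': ['rush copley', 'rcmc', 'rush copley medical center', 'copley'],
--     'rcmc': ['rush copley', 'rcmc', 'rush copley medical center', 'copley'],
--     'rush copley medical center': ['rush copley', 'rcmc', 'rush copley medical center', 'copley'],
--     'copley': ['rush copley', 'rcmc', 'rush copley medical center', 'copley'],
--     'rush medical group': ['rush medical group', 'rmg', 'medical group'],
--     'rmg': ['rush medical group', 'rmg', 'medical group'],
--     'medical group': ['rush medical group', 'rmg', 'medical group'],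
--     'oak park': ['oak park', 'roph', 'rush oak park', 'rush oak park hospital'],
--     'roph': ['oak park', 'roph', 'rush oak park', 'rush oak park hospital'],
--     'rush oak park': ['oak park', 'roph', 'rush oak park', 'rush oak park hospital'],
--     'rush oak park hospital': ['oak park', 'roph', 'rush oak park', 'rush oak park hospital'],
-- }
--
--
-- def _has_semantic_match(response: str, expected: str) -> bool:
--     """Check if response contains a semantic equivalent of expected."""
--     response_lower = response.lower()
--     expected_lower = expected.lower()
--     return expected_lower in response_lower or any(
--         form in response_lower for form in _EQUIVALENTS.get(expected_lower, ())
--     )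
-- ===== Notes on version B (the rewrite author's own statement) =====
-- stated objective: alternative
-- what changed: B replaces A's per-call scan over both synonym/entity dictionaries by a single keyed lookup in a precomputed reverse index (trigger term -> union of all equivalent forms of every entry it occurs in), followed by substring checks over just those forms.
import Mathlib
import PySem

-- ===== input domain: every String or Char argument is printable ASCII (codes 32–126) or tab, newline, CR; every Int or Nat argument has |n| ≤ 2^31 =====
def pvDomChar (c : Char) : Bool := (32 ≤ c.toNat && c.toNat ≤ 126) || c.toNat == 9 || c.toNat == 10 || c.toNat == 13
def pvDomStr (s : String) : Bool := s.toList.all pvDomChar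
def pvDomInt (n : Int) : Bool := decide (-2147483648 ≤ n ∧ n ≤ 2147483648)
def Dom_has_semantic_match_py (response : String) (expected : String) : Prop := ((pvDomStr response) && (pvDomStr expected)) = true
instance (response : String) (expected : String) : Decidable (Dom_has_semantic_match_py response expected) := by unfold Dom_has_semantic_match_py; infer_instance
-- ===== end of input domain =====

-- B replaces A's per-call scan over both synonym dictionaries by one keyed lookup
-- in a precomputed reverse index (trigger term -> union of equivalent forms):
-- alternative data structure, same results.

-- ===== PORT A =====
def pvNegationSynonyms : List (String × List String) := [
  ("not allowed", ["not permitted", "prohibited", "forbidden", "cannot", "may not", "must not", "no authorization", "no policy authorization"]),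
  ("not permitted", ["not allowed", "prohibited", "forbidden", "cannot", "may not", "no authorization", "no policy authorization"]),
  ("cannot", ["can not", "can't", "unable to", "not able to", "not authorized", "may not", "no authorization", "no policy authorization"]),
  ("does not", ["do not", "doesn't", "don't", "will not", "won't"]),
  ("does not respond", ["do not respond", "doesn't respond", "does not go", "will not respond"]),
  ("does NOT", ["does not", "do not", "will not", "doesn't"]),
  ("are not", ["is not", "aren't", "isn't", "not authorized", "cannot", "no authorization", "no policy authorization"]),
  ("not authorized", ["not permitted", "cannot", "may not", "are not allowed", "not authorized to", "no authorization", "no policy authorization"]),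
  ("not", ["no authorization", "no policy authorization", "no policy", "cannot", "may not", "there is no"]),
  ("required", ["must", "mandatory", "necessary", "need to", "shall", "requirement"]),
  ("limited", ["restricted", "only", "specific", "designated", "sparingly"]),
  ("emergent", ["emergency", "urgent", "critical", "immediate"]),
  ("emergencies", ["emergency situations", "emergency", "emergent", "urgent situations", "except in emergency"]),
  ("does not state", ["does not say", "policy does not", "not in the policy", "not true", "no,"]),
  ("fasting", ["NPO", "nothing by mouth", "no food", "nil per os"]),
  ("renal", ["kidney", "dialysis", "ESRD", "nephrology"]),
  ("indwelling", ["foley", "catheter", "urinary", "bladder"]),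
  ("resonance", ["MR", "MRI", "magnetic"]),
  ("imaging", ["MRI", "scan", "radiology"]),
  ("exception", ["except", "emergency", "unless", "however"])]

def pvEntityExpansions : List (String × List String) := [
  ("Rush University Medical Center", ["RUMC", "Rush", "medical center"]),
  ("Rush Copley", ["RCMC", "Rush Copley Medical Center", "Copley"]),
  ("Rush Medical Group", ["RMG", "medical group"]),
  ("Oak Park", ["ROPH", "Rush Oak Park", "Rush Oak Park Hospital"])]

def has_semantic_match_py (response : String) (expected : String) : Bool :=
  let response_lower := PySem.Str.lower response
  let expected_lower := PySem.Str.lower expected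
  if PySem.Str.isIn expected_lower response_lower then true
  else if pvNegationSynonyms.any (fun e =>
      (expected_lower == e.1 || e.2.contains expected_lower) &&
      (e.1 :: e.2).any (fun t => PySem.Str.isIn (PySem.Str.lower t) response_lower)) then true
  else if pvEntityExpansions.any (fun e =>
      let all_forms := PySem.Str.lower e.1 :: e.2.map PySem.Str.lower
      all_forms.contains expected_lower &&
      all_forms.any (fun f => PySem.Str.isIn f response_lower)) then true
  else false

-- ===== PORT B =====
-- _EQUIVALENTS: the precomputed reverse index from Source B, as an insertion-ordered dict
def pvIndex : List (String × List String) := [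
  ("not allowed", ["not allowed", "not permitted", "prohibited", "forbidden", "cannot", "may not", "must not", "no authorization", "no policy authorization"]),
  ("not permitted", ["not allowed", "not permitted", "prohibited", "forbidden", "cannot", "may not", "must not", "no authorization", "no policy authorization", "not authorized", "are not allowed", "not authorized to"]),
  ("prohibited", ["not allowed", "not permitted", "prohibited", "forbidden", "cannot", "may not", "must not", "no authorization", "no policy authorization"]),
  ("forbidden", ["not allowed", "not permitted", "prohibited", "forbidden", "cannot", "may not", "must not", "no authorization", "no policy authorization"]),
  ("cannot", ["not allowed", "not permitted", "prohibited", "forbidden", "cannot", "may not", "must not", "no authorization", "no policy authorization", "can not", "can't", "unable to", "not able to", "not authorized", "are not", "is not", "aren't", "isn't", "are not allowed", "not authorized to", "not", "no policy", "there is no"]),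
  ("may not", ["not allowed", "not permitted", "prohibited", "forbidden", "cannot", "may not", "must not", "no authorization", "no policy authorization", "can not", "can't", "unable to", "not able to", "not authorized", "are not allowed", "not authorized to", "not", "no policy", "there is no"]),
  ("must not", ["not allowed", "not permitted", "prohibited", "forbidden", "cannot", "may not", "must not", "no authorization", "no policy authorization"]),
  ("no authorization", ["not allowed", "not permitted", "prohibited", "forbidden", "cannot", "may not", "must not", "no authorization", "no policy authorization", "can not", "can't", "unable to", "not able to", "not authorized", "are not", "is not", "aren't", "isn't", "are not allowed", "not authorized to", "not", "no policy", "there is no"]),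
  ("no policy authorization", ["not allowed", "not permitted", "prohibited", "forbidden", "cannot", "may not", "must not", "no authorization", "no policy authorization", "can not", "can't", "unable to", "not able to", "not authorized", "are not", "is not", "aren't", "isn't", "are not allowed", "not authorized to", "not", "no policy", "there is no"]),
  ("can not", ["cannot", "can not", "can't", "unable to", "not able to", "not authorized", "may not", "no authorization", "no policy authorization"]),
  ("can't", ["cannot", "can not", "can't", "unable to", "not able to", "not authorized", "may not", "no authorization", "no policy authorization"]),
  ("unable to", ["cannot", "can not", "can't", "unable to", "not able to", "not authorized", "may not", "no authorization", "no policy authorization"]),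
  ("not able to", ["cannot", "can not", "can't", "unable to", "not able to", "not authorized", "may not", "no authorization", "no policy authorization"]),
  ("not authorized", ["cannot", "can not", "can't", "unable to", "not able to", "not authorized", "may not", "no authorization", "no policy authorization", "are not", "is not", "aren't", "isn't", "not permitted", "are not allowed", "not authorized to"]),
  ("does not", ["does not", "do not", "doesn't", "don't", "will not", "won't"]),
  ("do not", ["does not", "do not", "doesn't", "don't", "will not", "won't"]),
  ("doesn't", ["does not", "do not", "doesn't", "don't", "will not", "won't"]),
  ("don't", ["does not", "do not", "doesn't", "don't", "will not", "won't"]),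
  ("will not", ["does not", "do not", "doesn't", "don't", "will not", "won't"]),
  ("won't", ["does not", "do not", "doesn't", "don't", "will not", "won't"]),
  ("does not respond", ["does not respond", "do not respond", "doesn't respond", "does not go", "will not respond"]),
  ("do not respond", ["does not respond", "do not respond", "doesn't respond", "does not go", "will not respond"]),
  ("doesn't respond", ["does not respond", "do not respond", "doesn't respond", "does not go", "will not respond"]),
  ("does not go", ["does not respond", "do not respond", "doesn't respond", "does not go", "will not respond"]),
  ("will not respond", ["does not respond", "do not respond", "doesn't respond", "does not go", "will not respond"]),
  ("does NOT", ["does not", "do not", "will not", "doesn't"]),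
  ("are not", ["are not", "is not", "aren't", "isn't", "not authorized", "cannot", "no authorization", "no policy authorization"]),
  ("is not", ["are not", "is not", "aren't", "isn't", "not authorized", "cannot", "no authorization", "no policy authorization"]),
  ("aren't", ["are not", "is not", "aren't", "isn't", "not authorized", "cannot", "no authorization", "no policy authorization"]),
  ("isn't", ["are not", "is not", "aren't", "isn't", "not authorized", "cannot", "no authorization", "no policy authorization"]),
  ("are not allowed", ["not authorized", "not permitted", "cannot", "may not", "are not allowed", "not authorized to", "no authorization", "no policy authorization"]),
  ("not authorized to", ["not authorized", "not permitted", "cannot", "may not", "are not allowed", "not authorized to", "no authorization", "no policy authorization"]),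
  ("not", ["not", "no authorization", "no policy authorization", "no policy", "cannot", "may not", "there is no"]),
  ("no policy", ["not", "no authorization", "no policy authorization", "no policy", "cannot", "may not", "there is no"]),
  ("there is no", ["not", "no authorization", "no policy authorization", "no policy", "cannot", "may not", "there is no"]),
  ("required", ["required", "must", "mandatory", "necessary", "need to", "shall", "requirement"]),
  ("must", ["required", "must", "mandatory", "necessary", "need to", "shall", "requirement"]),
  ("mandatory", ["required", "must", "mandatory", "necessary", "need to", "shall", "requirement"]),
  ("necessary", ["required", "must", "mandatory", "necessary", "need to", "shall", "requirement"]),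
  ("need to", ["required", "must", "mandatory", "necessary", "need to", "shall", "requirement"]),
  ("shall", ["required", "must", "mandatory", "necessary", "need to", "shall", "requirement"]),
  ("requirement", ["required", "must", "mandatory", "necessary", "need to", "shall", "requirement"]),
  ("limited", ["limited", "restricted", "only", "specific", "designated", "sparingly"]),
  ("restricted", ["limited", "restricted", "only", "specific", "designated", "sparingly"]),
  ("only", ["limited", "restricted", "only", "specific", "designated", "sparingly"]),
  ("specific", ["limited", "restricted", "only", "specific", "designated", "sparingly"]),
  ("designated", ["limited", "restricted", "only", "specific", "designated", "sparingly"]),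
  ("sparingly", ["limited", "restricted", "only", "specific", "designated", "sparingly"]),
  ("emergent", ["emergent", "emergency", "urgent", "critical", "immediate", "emergencies", "emergency situations", "urgent situations", "except in emergency"]),
  ("emergency", ["emergent", "emergency", "urgent", "critical", "immediate", "emergencies", "emergency situations", "urgent situations", "except in emergency", "exception", "except", "unless", "however"]),
  ("urgent", ["emergent", "emergency", "urgent", "critical", "immediate"]),
  ("critical", ["emergent", "emergency", "urgent", "critical", "immediate"]),
  ("immediate", ["emergent", "emergency", "urgent", "critical", "immediate"]),
  ("emergencies", ["emergencies", "emergency situations", "emergency", "emergent", "urgent situations", "except in emergency"]),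
  ("emergency situations", ["emergencies", "emergency situations", "emergency", "emergent", "urgent situations", "except in emergency"]),
  ("urgent situations", ["emergencies", "emergency situations", "emergency", "emergent", "urgent situations", "except in emergency"]),
  ("except in emergency", ["emergencies", "emergency situations", "emergency", "emergent", "urgent situations", "except in emergency"]),
  ("does not state", ["does not state", "does not say", "policy does not", "not in the policy", "not true", "no,"]),
  ("does not say", ["does not state", "does not say", "policy does not", "not in the policy", "not true", "no,"]),
  ("policy does not", ["does not state", "does not say", "policy does not", "not in the policy", "not true", "no,"]),
  ("not in the policy", ["does not state", "does not say", "policy does not", "not in the policy", "not true", "no,"]),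
  ("not true", ["does not state", "does not say", "policy does not", "not in the policy", "not true", "no,"]),
  ("no,", ["does not state", "does not say", "policy does not", "not in the policy", "not true", "no,"]),
  ("fasting", ["fasting", "npo", "nothing by mouth", "no food", "nil per os"]),
  ("NPO", ["fasting", "npo", "nothing by mouth", "no food", "nil per os"]),
  ("nothing by mouth", ["fasting", "npo", "nothing by mouth", "no food", "nil per os"]),
  ("no food", ["fasting", "npo", "nothing by mouth", "no food", "nil per os"]),
  ("nil per os", ["fasting", "npo", "nothing by mouth", "no food", "nil per os"]),
  ("renal", ["renal", "kidney", "dialysis", "esrd", "nephrology"]),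
  ("kidney", ["renal", "kidney", "dialysis", "esrd", "nephrology"]),
  ("dialysis", ["renal", "kidney", "dialysis", "esrd", "nephrology"]),
  ("ESRD", ["renal", "kidney", "dialysis", "esrd", "nephrology"]),
  ("nephrology", ["renal", "kidney", "dialysis", "esrd", "nephrology"]),
  ("indwelling", ["indwelling", "foley", "catheter", "urinary", "bladder"]),
  ("foley", ["indwelling", "foley", "catheter", "urinary", "bladder"]),
  ("catheter", ["indwelling", "foley", "catheter", "urinary", "bladder"]),
  ("urinary", ["indwelling", "foley", "catheter", "urinary", "bladder"]),
  ("bladder", ["indwelling", "foley", "catheter", "urinary", "bladder"]),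
  ("resonance", ["resonance", "mr", "mri", "magnetic"]),
  ("MR", ["resonance", "mr", "mri", "magnetic"]),
  ("MRI", ["resonance", "mr", "mri", "magnetic", "imaging", "scan", "radiology"]),
  ("magnetic", ["resonance", "mr", "mri", "magnetic"]),
  ("imaging", ["imaging", "mri", "scan", "radiology"]),
  ("scan", ["imaging", "mri", "scan", "radiology"]),
  ("radiology", ["imaging", "mri", "scan", "radiology"]),
  ("exception", ["exception", "except", "emergency", "unless", "however"]),
  ("except", ["exception", "except", "emergency", "unless", "however"]),
  ("unless", ["exception", "except", "emergency", "unless", "however"]),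
  ("however", ["exception", "except", "emergency", "unless", "however"]),
  ("rush university medical center", ["rush university medical center", "rumc", "rush", "medical center"]),
  ("rumc", ["rush university medical center", "rumc", "rush", "medical center"]),
  ("rush", ["rush university medical center", "rumc", "rush", "medical center"]),
  ("medical center", ["rush university medical center", "rumc", "rush", "medical center"]),
  ("rush copley", ["rush copley", "rcmc", "rush copley medical center", "copley"]),
  ("rcmc", ["rush copley", "rcmc", "rush copley medical center", "copley"]),
  ("rush copley medical center", ["rush copley", "rcmc", "rush copley medical center", "copley"]),
  ("copley", ["rush copley", "rcmc", "rush copley medical center", "copley"]),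
  ("rush medical group", ["rush medical group", "rmg", "medical group"]),
  ("rmg", ["rush medical group", "rmg", "medical group"]),
  ("medical group", ["rush medical group", "rmg", "medical group"]),
  ("oak park", ["oak park", "roph", "rush oak park", "rush oak park hospital"]),
  ("roph", ["oak park", "roph", "rush oak park", "rush oak park hospital"]),
  ("rush oak park", ["oak park", "roph", "rush oak park", "rush oak park hospital"]),
  ("rush oak park hospital", ["oak park", "roph", "rush oak park", "rush oak park hospital"])]


def has_semantic_match_py_alt (response : String) (expected : String) : Bool :=
  let response_lower := PySem.Str.lower response
  let expected_lower := PySem.Str.lower expected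
  PySem.Str.isIn expected_lower response_lower ||
    ((PySem.Dict.mk pvIndex).getD expected_lower []).any
      (fun form => PySem.Str.isIn form response_lower)

-- ===== PRECONDITION & SPEC =====
def Spec_has_semantic_match_py (response : String) (expected : String) (out : Bool) : Prop := out = has_semantic_match_py_alt response expected
instance (response : String) (expected : String) (out : Bool) : Decidable (Spec_has_semantic_match_py response expected out) := by unfold Spec_has_semantic_match_py; infer_instance

-- ===== CLAIM (what is proved, stated in full; the proofs are below) =====
def Claim_equal_has_semantic_match_py : Prop := ∀ (response : String) (expected : String), Dom_has_semantic_match_py response expected → Spec_has_semantic_match_py response expected (has_semantic_match_py response expected)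

-- ===== LEMMAS AND PROOFS =====

-- spec-level reconstruction of the index from A's tables (proof helper only)
def pvAddEntry (idx : PySem.Dict String (PySem.Set String))
    (triggers : List String) (forms : List String) : PySem.Dict String (PySem.Set String) :=
  triggers.foldl (fun d t => d.insert t (PySem.Set.update (d.getD t PySem.Set.empty) forms)) idx

def pvBuilt : PySem.Dict String (PySem.Set String) :=
  let idx := pvNegationSynonyms.foldl
    (fun d e => pvAddEntry d (e.1 :: e.2) ((e.1 :: e.2).map PySem.Str.lower)) PySem.Dict.empty
  pvEntityExpansions.foldl
    (fun d e => pvAddEntry d (PySem.Str.lower e.1 :: e.2.map PySem.Str.lower)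
                             (PySem.Str.lower e.1 :: e.2.map PySem.Str.lower)) idx

-- the hardcoded index is exactly the one built from the tables
set_option maxRecDepth 100000 in
theorem pvBuilt_eq : pvBuilt = PySem.Dict.mk pvIndex := by decide

-- the forms unlocked through a negation-synonym entry / an entity entry
def PNeg (rl el : String) : Prop :=
  ∃ e ∈ pvNegationSynonyms, el ∈ (e.1 :: e.2) ∧
    ∃ t ∈ (e.1 :: e.2), PySem.Str.isIn (PySem.Str.lower t) rl = true

def PEnt (rl el : String) : Prop :=
  ∃ e ∈ pvEntityExpansions, el ∈ (PySem.Str.lower e.1 :: e.2.map PySem.Str.lower) ∧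
    ∃ f ∈ (PySem.Str.lower e.1 :: e.2.map PySem.Str.lower), PySem.Str.isIn f rl = true

-- membership in the value at key `el` after folding one entry's triggers in
theorem pv_mem_addEntry (trigs forms : List String)
    (d : PySem.Dict String (PySem.Set String)) (el x : String) :
    x ∈ (pvAddEntry d trigs forms).getD el ([] : List String) ↔
      x ∈ d.getD el ([] : List String) ∨ (el ∈ trigs ∧ x ∈ forms) := by
  induction trigs generalizing d with
  | nil => simp [pvAddEntry]
  | cons t ts ih =>
    simp only [pvAddEntry, List.foldl_cons] at *
    rw [ih, PySem.Dict.getD_insert]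
    by_cases h : el = t
    · subst h
      simp only [List.mem_cons, if_true, true_or, true_and,
        PySem.Set.mem_update]
      tauto
    · simp only [if_neg h, List.mem_cons]
      tauto

-- membership in the value at key `el` after folding a whole entry list in
theorem pv_mem_foldEntries (L : List (String × List String))
    (trig forms : String × List String → List String)
    (d : PySem.Dict String (PySem.Set String)) (el x : String) :
    x ∈ (L.foldl (fun d e => pvAddEntry d (trig e) (forms e)) d).getD el ([] : List String) ↔
      x ∈ d.getD el ([] : List String) ∨ ∃ e ∈ L, el ∈ trig e ∧ x ∈ forms e := by
  induction L generalizing d with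
  | nil => simp
  | cons e es ih =>
    simp only [List.foldl_cons]
    rw [ih, pv_mem_addEntry]
    simp only [List.mem_cons]
    constructor
    · rintro (((h | ⟨ht, hf⟩) | ⟨e', he', ht, hf⟩))
      · exact Or.inl h
      · exact Or.inr ⟨e, Or.inl rfl, ht, hf⟩
      · exact Or.inr ⟨e', Or.inr he', ht, hf⟩
    · rintro (h | ⟨e', (rfl | he'), ht, hf⟩)
      · exact Or.inl (Or.inl h)
      · exact Or.inl (Or.inr ⟨ht, hf⟩)
      · exact Or.inr ⟨e', he', ht, hf⟩

-- B's index lookup yields exactly the forms A's two scans can find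
theorem pv_alt_any_iff (rl el : String) :
    (((PySem.Dict.mk pvIndex).getD el []).any
        (fun form => PySem.Str.isIn form rl) = true) ↔ PNeg rl el ∨ PEnt rl el := by
  rw [← pvBuilt_eq, List.any_eq_true]
  unfold PNeg PEnt
  constructor
  · rintro ⟨x, hx, hin⟩
    rw [pvBuilt] at hx
    rw [pv_mem_foldEntries, pv_mem_foldEntries] at hx
    simp only [PySem.Dict.getD_empty] at hx
    rcases hx with ((h | ⟨e, he, htr, hf⟩) | ⟨e, he, htr, hf⟩)
    · exact absurd h (List.not_mem_nil)
    · left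
      refine ⟨e, he, htr, ?_⟩
      rcases List.mem_map.mp hf with ⟨t, ht, rfl⟩
      exact ⟨t, ht, hin⟩
    · right
      exact ⟨e, he, htr, x, hf, hin⟩
  · rintro (⟨e, he, htr, t, ht, hin⟩ | ⟨e, he, htr, f, hf, hin⟩)
    · refine ⟨PySem.Str.lower t, ?_, hin⟩
      rw [pvBuilt]
      rw [pv_mem_foldEntries, pv_mem_foldEntries]
      exact Or.inl (Or.inr ⟨e, he, htr, List.mem_map_of_mem ht⟩)
    · refine ⟨f, ?_, hin⟩
      rw [pvBuilt]
      rw [pv_mem_foldEntries, pv_mem_foldEntries]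
      exact Or.inr ⟨e, he, htr, hf⟩

-- A's negation-scan condition, characterised
theorem pv_neg_iff (rl el : String) :
    (pvNegationSynonyms.any (fun e =>
      (el == e.1 || e.2.contains el) &&
      (e.1 :: e.2).any (fun t => PySem.Str.isIn (PySem.Str.lower t) rl)) = true) ↔ PNeg rl el := by
  rw [List.any_eq_true]
  unfold PNeg
  apply exists_congr; intro e
  apply and_congr_right; intro _
  rw [Bool.and_eq_true, List.any_eq_true]
  apply and_congr_left; intro _
  simp [List.mem_cons]

-- A's entity-scan condition, characterised
theorem pv_ent_iff (rl el : String) :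
    (pvEntityExpansions.any (fun e =>
      (PySem.Str.lower e.1 :: e.2.map PySem.Str.lower).contains el &&
      (PySem.Str.lower e.1 :: e.2.map PySem.Str.lower).any
        (fun f => PySem.Str.isIn f rl)) = true) ↔ PEnt rl el := by
  rw [List.any_eq_true]
  unfold PEnt
  apply exists_congr; intro e
  apply and_congr_right; intro _
  rw [Bool.and_eq_true, List.any_eq_true]
  apply and_congr_left; intro _
  simp

-- the two ports, written with the lets expanded
theorem pv_main (rl el : String) :
    (if PySem.Str.isIn el rl then true
     else if pvNegationSynonyms.any (fun e =>
        (el == e.1 || e.2.contains el) &&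
        (e.1 :: e.2).any (fun t => PySem.Str.isIn (PySem.Str.lower t) rl)) then true
     else if pvEntityExpansions.any (fun e =>
        (PySem.Str.lower e.1 :: e.2.map PySem.Str.lower).contains el &&
        (PySem.Str.lower e.1 :: e.2.map PySem.Str.lower).any
          (fun f => PySem.Str.isIn f rl)) then true
     else false)
    = (PySem.Str.isIn el rl ||
        ((PySem.Dict.mk pvIndex).getD el []).any (fun form => PySem.Str.isIn form rl)) := by
  by_cases hdir : PySem.Str.isIn el rl = true
  · rw [if_pos hdir, hdir, Bool.true_or]
  · rw [if_neg hdir, Bool.eq_false_iff.mpr hdir, Bool.false_or, Bool.eq_iff_iff,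
        pv_alt_any_iff]
    constructor
    · intro h
      split_ifs at h with h1 h2
      · exact Or.inl ((pv_neg_iff rl el).mp h1)
      · exact Or.inr ((pv_ent_iff rl el).mp h2)
    · rintro (h | h)
      · rw [if_pos ((pv_neg_iff rl el).mpr h)]
      · by_cases h1 : pvNegationSynonyms.any (fun e =>
            (el == e.1 || e.2.contains el) &&
            (e.1 :: e.2).any (fun t => PySem.Str.isIn (PySem.Str.lower t) rl)) = true
        · rw [if_pos h1]
        · rw [if_neg h1, if_pos ((pv_ent_iff rl el).mpr h)]

-- ===== VERDICT (by name: the statement is the Claim_ definition above) =====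
theorem has_semantic_match_py_spec : Claim_equal_has_semantic_match_py := by
  intro response expected _
  unfold Spec_has_semantic_match_py
  unfold has_semantic_match_py has_semantic_match_py_alt
  exact pv_main (PySem.Str.lower response) (PySem.Str.lower expected)
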